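-- pv_equiv track=rewrite | github.com/giommazz/competitive_programming | leetcode/plus_one.py | plusOne_recursive
-- ===== SOURCE A (Python) =====
-- def plusOne_recursive(digits: list[int]) -> list[int]:
--     if not digits:
--         return [1]
--     else:
--         if digits[-1] < 9:
--             digits[-1] += 1
--             return digits
--         else:
--             if len(digits) == 1:
--                 return [1,0]
--             else:
--                 return plusOne_recursive(digits[:-1]) + [0]
-- ===== SOURCE B (Python) =====
-- def plusOne_recursive(digits: list[int]) -> list[int]:
--     # Single backward pass with a carry flag; does not mutate the input
--     # (A increments digits[-1] in place when it is < 9 -- return value only).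
--     rev = digits[::-1]
--     out_rev = []
--     carry = 1
--     for d in rev:
--         if carry == 0:
--             out_rev.append(d)
--         elif d < 9:
--             out_rev.append(d + 1)
--             carry = 0
--         else:
--             out_rev.append(0)
--     if carry:
--         out_rev.append(1)
--     return out_rev[::-1]
-- ===== Notes on version B (the rewrite author's own statement) =====
-- stated objective: alternative
-- what changed: Replaced A's recursion that slices digits[:-1] and concatenates at each level with a single backward pass over a reversed copy carrying a flag; B does not mutate its input (A increments the last element in place), so the equivalence is about the return value only.
import Mathlib
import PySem

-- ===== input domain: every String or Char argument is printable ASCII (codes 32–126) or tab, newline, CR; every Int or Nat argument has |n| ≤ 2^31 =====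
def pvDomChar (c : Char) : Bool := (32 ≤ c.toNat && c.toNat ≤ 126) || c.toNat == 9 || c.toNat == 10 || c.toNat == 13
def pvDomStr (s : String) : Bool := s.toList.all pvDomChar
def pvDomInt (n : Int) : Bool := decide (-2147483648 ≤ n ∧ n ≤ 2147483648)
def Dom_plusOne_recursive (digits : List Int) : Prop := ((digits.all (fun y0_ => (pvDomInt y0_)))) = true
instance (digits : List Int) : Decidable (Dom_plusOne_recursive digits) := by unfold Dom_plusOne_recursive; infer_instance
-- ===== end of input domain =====

-- B replaces A's slice-and-concatenate recursion with a single backward pass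
-- carrying a flag; return-value equivalence only (A mutates digits[-1] in
-- place when it is < 9, B never mutates its input).

-- ===== PORT A =====
-- digits[-1] on a nonempty list is its last element (getLast! with Int
-- inhabited is exact); 'digits[-1] += 1; return digits' returns the list
-- with the last element incremented; digits[:-1] = dropLast (exact,
-- PySem.List.slice_to_neg_one).
def plusOne_recursive (digits : List Int) : List Int :=
  if h : digits = [] then [1]
  else
    if digits.getLast! < 9 then digits.dropLast ++ [digits.getLast! + 1]
    else
      if digits.length = 1 then [1, 0]
      else plusOne_recursive digits.dropLast ++ [0]
termination_by digits.length
decreasing_by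
  simp [List.length_dropLast]
  exact List.length_pos_iff.mpr h

-- ===== PORT B =====
-- the loop body of Source B: state = (out_rev, carry)
def pvAltStep (st : List Int × Int) (d : Int) : List Int × Int :=
  if st.2 = 0 then (st.1 ++ [d], st.2)
  else if d < 9 then (st.1 ++ [d + 1], 0)
  else (st.1 ++ [0], st.2)

def plusOne_recursive_alt (digits : List Int) : List Int :=
  -- rev = digits[::-1] (PySem.List.slice?_none_none_neg_one: this is reverse)
  let rev := digits.reverse
  let p := rev.foldl pvAltStep ([], 1)
  let outRev := if p.2 ≠ 0 then p.1 ++ [1] else p.1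
  outRev.reverse

-- ===== PRECONDITION & SPEC =====
def Spec_plusOne_recursive (digits : List Int) (out : List Int) : Prop := out = plusOne_recursive_alt digits
instance (digits : List Int) (out : List Int) : Decidable (Spec_plusOne_recursive digits out) := by unfold Spec_plusOne_recursive; infer_instance

-- ===== CLAIM (what is proved, stated in full; the proofs are below) =====
def Claim_equal_plusOne_recursive : Prop := ∀ (digits : List Int), Dom_plusOne_recursive digits → Spec_plusOne_recursive digits (plusOne_recursive digits)

-- ===== LEMMAS AND PROOFS =====

-- common characterisation: plus-one on the REVERSED digit list
def pvSpecRev : List Int → List Int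
  | [] => [1]
  | d :: t => if d < 9 then (d + 1) :: t else 0 :: pvSpecRev t

-- carry already consumed: the fold just copies the rest
theorem pvAlt_fold_zero (l acc : List Int) :
    l.foldl pvAltStep (acc, 0) = (acc ++ l, 0) := by
  induction l generalizing acc with
  | nil => simp
  | cons d t ih => simp [pvAltStep, ih]

-- carry pending: the fold's output (after the final carry append) is acc ++ pvSpecRev l
theorem pvAlt_fold_one (l acc : List Int) :
    (let p := l.foldl pvAltStep (acc, 1);
     if p.2 ≠ 0 then p.1 ++ [1] else p.1) = acc ++ pvSpecRev l := by
  induction l generalizing acc with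
  | nil => simp [pvSpecRev]
  | cons d t ih =>
    by_cases hd : d < 9
    · simp [pvAltStep, hd, pvAlt_fold_zero, pvSpecRev]
    · have h := ih (acc ++ [0])
      rw [List.append_assoc, List.singleton_append] at h
      simpa [pvAltStep, hd, pvSpecRev] using h

theorem pvAlt_eq_spec (digits : List Int) :
    plusOne_recursive_alt digits = (pvSpecRev digits.reverse).reverse := by
  simp only [plusOne_recursive_alt]
  rw [pvAlt_fold_one digits.reverse []]
  simp

theorem pvA_eq_spec (digits : List Int) :
    plusOne_recursive digits = (pvSpecRev digits.reverse).reverse := by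
  induction digits using List.reverseRecOn with
  | nil => simp [plusOne_recursive, pvSpecRev]
  | append_singleton xs d ih =>
    rw [plusOne_recursive]
    simp only [List.reverse_append, List.reverse_singleton, List.singleton_append]
    by_cases hd : d < 9
    · simp [pvSpecRev, hd]
    · cases xs with
      | nil => simp [pvSpecRev, hd]
      | cons y ys =>
        have h2 : (y :: (ys ++ [d])).getLast?.getD 0 = d := by
          rw [show y :: (ys ++ [d]) = (y :: ys) ++ [d] from rfl, List.getLast?_concat]; rfl
        have h3 : (y :: (ys ++ [d])).dropLast = y :: ys := by
          rw [show y :: (ys ++ [d]) = (y :: ys) ++ [d] from rfl, List.dropLast_concat]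
        simp [pvSpecRev, hd, ih, h2, h3]

-- ===== VERDICT (by name: the statement is the Claim_ definition above) =====
theorem plusOne_recursive_spec : Claim_equal_plusOne_recursive := by
  intro digits _
  show _ = _
  rw [pvA_eq_spec, pvAlt_eq_spec]
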